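-- pv_equiv track=rewrite | github.com/kirtan226/python-practice-programs | mode_mean.py | check
-- ===== SOURCE A (Python) =====
-- def check(list):
--     l=len(list)
--     mean = sum(list)//l    #find the mean value
--
--     repet_check={}
--     for i in list:
--         if i in repet_check:
--             repet_check[i]+=1
--         else:
--             repet_check[i]=1
--
--     mode=max(repet_check.values())  #find the maximum repeated value is dictionary
--
--     if mode==mean:
--         return 1
--     else:
--         return 0
-- ===== SOURCE B (Python) =====
-- def check(list):
--     l = len(list)
--     mean = sum(list) // l    # same mean; preserves ZeroDivisionError on empty input
--     prev = None
--     run = 0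
--     best = 0
--     for x in sorted(list):   # mode count = longest run of equal consecutive elements
--         run = run + 1 if x == prev else 1
--         best = max(best, run)
--         prev = x
--     return 1 if best == mean else 0
-- ===== Notes on version B (the rewrite author's own statement) =====
-- stated objective: alternative
-- what changed: The frequency dictionary is replaced by sorting the list and sweeping it once, tracking the longest run of equal consecutive elements, which on a sorted list equals the mode's count; the mean and the final 1/0 comparison are unchanged.
import Mathlib
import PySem

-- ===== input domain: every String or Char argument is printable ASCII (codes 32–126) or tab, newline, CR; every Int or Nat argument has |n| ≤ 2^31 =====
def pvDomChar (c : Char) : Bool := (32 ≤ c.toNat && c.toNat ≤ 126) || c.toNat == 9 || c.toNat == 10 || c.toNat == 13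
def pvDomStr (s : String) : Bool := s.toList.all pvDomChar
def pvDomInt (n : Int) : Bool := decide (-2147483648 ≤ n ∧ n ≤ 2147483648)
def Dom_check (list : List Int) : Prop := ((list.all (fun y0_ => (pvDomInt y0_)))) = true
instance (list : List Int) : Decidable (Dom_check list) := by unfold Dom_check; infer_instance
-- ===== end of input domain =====

-- B replaces A's frequency dictionary by a sorted run-length sweep (alternative decomposition, same result).

-- ===== PORT A =====
def check (list : List Int) : Int :=
  let l : Int := PySem.List.len list
  let mean : Int := PySem.Int.floordiv list.sum l  -- ZeroDivisionError for l = 0: excluded by Pre_check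
  let repet : PySem.Dict Int Int :=
    list.foldl (fun d i => if d.contains i then d.insert i (d.getD i 0 + 1) else d.insert i 1)
      PySem.Dict.empty
  match PySem.List.max? repet.values (fun v => v) with  -- max(...) on empty values raises: unreachable under Pre_check
  | some mode => if mode = mean then 1 else 0
  | none => 0

-- ===== PORT B =====
def check_alt (list : List Int) : Int :=
  let l : Int := PySem.List.len list
  let mean : Int := PySem.Int.floordiv list.sum l  -- ZeroDivisionError for l = 0: excluded by Pre_check
  let st : Option Int × Int × Int :=
    (PySem.List.sorted list (fun x => x) false).foldl
      (fun st x =>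
        let run : Int := if some x = st.1 then st.2.1 + 1 else 1
        (some x, run, max st.2.2 run))
      (none, 0, 0)
  if st.2.2 = mean then 1 else 0

-- ===== PRECONDITION & SPEC =====
-- Pre_check excludes only the empty list, on which the Python A raises ZeroDivisionError.
def Pre_check (list : List Int) : Prop := list ≠ []
instance (list : List Int) : Decidable (Pre_check list) := by unfold Pre_check; infer_instance
def pvWitness_check : List Int := ([1])

def Spec_check (list : List Int) (out : Int) : Prop := out = check_alt list
instance (list : List Int) (out : Int) : Decidable (Spec_check list out) := by unfold Spec_check; infer_instance

-- ===== CLAIM (what is proved, stated in full; the proofs are below) =====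
def Claim_equal_check : Prop := ∀ (list : List Int), Dom_check list → Pre_check list → Spec_check list (check list)

-- ===== LEMMAS AND PROOFS =====

-- the sweep step of port B, named for the proofs (definitionally the lambda in check_alt)
def pvStep (st : Option Int × Int × Int) (x : Int) : Option Int × Int × Int :=
  let run : Int := if some x = st.1 then st.2.1 + 1 else 1
  (some x, run, max st.2.2 run)

-- A's fold function is pointwise the counter fold
lemma foldA_eq_counter (list : List Int) :
    list.foldl (fun d i => if d.contains i then d.insert i (d.getD i 0 + 1) else d.insert i 1)
      (PySem.Dict.empty : PySem.Dict Int Int) = PySem.Dict.counter list := by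
  have h : (fun (d : PySem.Dict Int Int) (i : Int) =>
        if d.contains i then d.insert i (d.getD i 0 + 1) else d.insert i 1)
      = fun d i => d.insert i (d.getD i 0 + 1) := by
    funext d i
    by_cases h : d.contains i
    · simp [h]
    · rw [if_neg h, PySem.Dict.getD_of_not_contains d (0 : Int) (by simp [h]), zero_add]
  rw [h, PySem.Dict.foldl_insert_getD_add_one_eq_counter]

-- the values of the counter dict are the counts of the distinct elements
lemma values_counter_eq (list : List Int) :
    (PySem.Dict.counter list).values
      = (PySem.Set.ofList list).map (fun k => ((list.count k : Nat) : Int)) := by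
  have h : (PySem.Dict.counter list).values = (PySem.Dict.counter list).items.map (·.2) := rfl
  rw [h, PySem.Dict.items_counter, List.map_map]
  rfl

-- invariant of B's sweep on a sorted tail, state = (prev, current run, best):
-- best never drops, bounds every multiplicity (the run for prev continuing by r), and is b or a reached bound
lemma sweep_invariant (s : List Int) (hs : s.Pairwise (· ≤ ·)) :
    ∀ (x r b : Int), 1 ≤ r → r ≤ b → (∀ v ∈ s, x ≤ v) →
      (b ≤ (s.foldl pvStep (some x, r, b)).2.2) ∧
      (∀ v ∈ s, (s.count v : Int) + (if v = x then r else 0) ≤ (s.foldl pvStep (some x, r, b)).2.2) ∧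
      ((s.foldl pvStep (some x, r, b)).2.2 = b ∨
        ∃ v ∈ s, (s.foldl pvStep (some x, r, b)).2.2 = (s.count v : Int) + (if v = x then r else 0)) := by
  induction s with
  | nil => intro x r b h1 h2 _; exact ⟨le_refl _, by simp, Or.inl rfl⟩
  | cons y t ih =>
    intro x r b h1 h2 hxle
    have hst : t.Pairwise (· ≤ ·) := hs.tail
    have hyle : ∀ v ∈ t, y ≤ v := fun v hv => (List.pairwise_cons.mp hs).1 v hv
    by_cases hxy : y = x
    · -- run continues
      subst hxy
      have hstep : List.foldl pvStep (some y, r, b) (y :: t) = List.foldl pvStep (some y, r + 1, max b (r + 1)) t := by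
        simp [pvStep]
      obtain ⟨ih1, ih2, ih3⟩ := ih hst y (r + 1) (max b (r + 1)) (by omega) (le_max_right _ _) hyle
      rw [hstep]
      refine ⟨le_trans (le_max_left _ _) ih1, ?_, ?_⟩
      · intro v hv
        by_cases hvy : v = y
        · subst hvy
          rw [if_pos rfl, List.count_cons_self]
          by_cases hvt : v ∈ t
          · have h' := ih2 v hvt
            rw [if_pos rfl] at h'
            push_cast
            omega
          · rw [List.count_eq_zero_of_not_mem hvt]
            have hmx : r + 1 ≤ max b (r + 1) := le_max_right _ _
            push_cast
            omega
        · have hvt : v ∈ t := (List.mem_cons.mp hv).resolve_left hvy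
          have h' := ih2 v hvt
          rw [if_neg hvy] at h' ⊢
          rw [List.count_cons_of_ne (Ne.symm hvy)]
          exact h'
      · rcases ih3 with h | ⟨v, hv, h⟩
        · by_cases hbr : r + 1 ≤ b
          · left; rw [h]; omega
          · right
            by_cases hyt : y ∈ t
            · exfalso
              have h2' := ih2 y hyt
              rw [if_pos rfl] at h2'
              have hc : (1 : Int) ≤ (t.count y : Int) := by
                exact_mod_cast List.one_le_count_iff.mpr hyt
              rw [h] at h2'
              omega
            · refine ⟨y, List.mem_cons_self, ?_⟩
              rw [h, if_pos rfl, List.count_cons_self, List.count_eq_zero_of_not_mem hyt]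
              push_cast
              omega
        · right
          refine ⟨v, List.mem_cons_of_mem _ hv, ?_⟩
          by_cases hvy : v = y
          · subst hvy
            rw [h, if_pos rfl, if_pos rfl, List.count_cons_self]
            push_cast
            omega
          · rw [h, if_neg hvy, if_neg hvy, List.count_cons_of_ne (Ne.symm hvy)]
    · -- run breaks: y ≠ x, and by sortedness x occurs nowhere in y :: t
      have hxnotin : x ∉ y :: t := by
        intro hx
        rcases List.mem_cons.mp hx with h | h
        · exact hxy h.symm
        · exact hxy (le_antisymm (hyle x h) (hxle y List.mem_cons_self))
      have hb1 : (1 : Int) ≤ b := le_trans h1 h2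
      have hstep : List.foldl pvStep (some x, r, b) (y :: t) = List.foldl pvStep (some y, 1, b) t := by
        simp only [List.foldl_cons, pvStep, Option.some.injEq, if_neg hxy, max_eq_left hb1]
      obtain ⟨ih1, ih2, ih3⟩ := ih hst y 1 b le_rfl hb1 hyle
      rw [hstep]
      have hxt : x ∉ t := fun h => hxnotin (List.mem_cons_of_mem _ h)
      refine ⟨ih1, ?_, ?_⟩
      · intro v hv
        have hvnx : v ≠ x := fun h => hxnotin (h ▸ hv)
        rw [if_neg hvnx, add_zero]
        by_cases hvy : v = y
        · subst hvy
          rw [List.count_cons_self]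
          by_cases hvt : v ∈ t
          · have h' := ih2 v hvt
            rw [if_pos rfl] at h'
            push_cast
            omega
          · rw [List.count_eq_zero_of_not_mem hvt]
            push_cast
            omega
        · have hvt : v ∈ t := (List.mem_cons.mp hv).resolve_left hvy
          have h' := ih2 v hvt
          rw [if_neg hvy, add_zero] at h'
          rw [List.count_cons_of_ne (Ne.symm hvy)]
          exact h'
      · rcases ih3 with h | ⟨v, hv, h⟩
        · exact Or.inl h
        · right
          refine ⟨v, List.mem_cons_of_mem _ hv, ?_⟩
          have hvnx : v ≠ x := fun he => hxt (he ▸ hv)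
          rw [if_neg hvnx, add_zero]
          by_cases hvy : v = y
          · subst hvy
            rw [h, if_pos rfl, List.count_cons_self]
            push_cast
            omega
          · rw [h, if_neg hvy, add_zero, List.count_cons_of_ne (Ne.symm hvy)]

-- B's sweep over a nonempty sorted list reaches the maximal multiplicity
lemma sweep_spec (s : List Int) (hs : s.Pairwise (· ≤ ·)) (hne : s ≠ []) :
    (∃ v ∈ s, (s.foldl pvStep (none, 0, 0)).2.2 = (s.count v : Int)) ∧
    (∀ v ∈ s, (s.count v : Int) ≤ (s.foldl pvStep (none, 0, 0)).2.2) := by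
  match s, hne with
  | y :: t, _ =>
    have hst : t.Pairwise (· ≤ ·) := hs.tail
    have hyle : ∀ v ∈ t, y ≤ v := fun v hv => (List.pairwise_cons.mp hs).1 v hv
    have hstep : List.foldl pvStep ((none : Option Int), 0, 0) (y :: t) = List.foldl pvStep (some y, 1, 1) t := by
      simp [pvStep]
    obtain ⟨ih1, ih2, ih3⟩ := sweep_invariant t hst y 1 1 le_rfl le_rfl hyle
    rw [hstep]
    have hub : ∀ v ∈ y :: t, ((y :: t).count v : Int) ≤ (List.foldl pvStep (some y, 1, 1) t).2.2 := by
      intro v hv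
      by_cases hvy : v = y
      · subst hvy
        rw [List.count_cons_self]
        by_cases hvt : v ∈ t
        · have h' := ih2 v hvt
          rw [if_pos rfl] at h'
          push_cast
          omega
        · rw [List.count_eq_zero_of_not_mem hvt]
          push_cast
          omega
      · have hvt : v ∈ t := (List.mem_cons.mp hv).resolve_left hvy
        have h' := ih2 v hvt
        rw [if_neg hvy, add_zero] at h'
        rw [List.count_cons_of_ne (Ne.symm hvy)]
        exact h'
    refine ⟨?_, hub⟩
    rcases ih3 with h | ⟨v, hv, h⟩
    · refine ⟨y, List.mem_cons_self, ?_⟩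
      have h1 := hub y List.mem_cons_self
      have hc : (1 : Int) ≤ ((y :: t).count y : Int) := by
        exact_mod_cast List.one_le_count_iff.mpr List.mem_cons_self
      rw [h] at h1 ⊢
      omega
    · by_cases hvy : v = y
      · subst hvy
        refine ⟨v, List.mem_cons_self, ?_⟩
        rw [h, if_pos rfl, List.count_cons_self]
        push_cast
        omega
      · refine ⟨v, List.mem_cons_of_mem _ hv, ?_⟩
        rw [h, if_neg hvy, add_zero, List.count_cons_of_ne (Ne.symm hvy)]

-- ===== VERDICT (by name: the statement is the Claim_ definition above) =====
theorem check_spec : Claim_equal_check := by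
  intro list _ hpre
  unfold Pre_check at hpre
  show check list = check_alt list
  have hfun : (fun (st : Option Int × Int × Int) (x : Int) =>
      let run : Int := if some x = st.1 then st.2.1 + 1 else 1
      (some x, run, max st.2.2 run)) = pvStep := rfl
  simp only [check, check_alt, hfun, foldA_eq_counter, values_counter_eq]
  -- facts about the sorted copy
  have hsp : (PySem.List.sorted list (fun x => x) false).Perm list :=
    PySem.List.sorted_perm list _ false
  have hspw : (PySem.List.sorted list (fun x => x) false).Pairwise (· ≤ ·) :=
    PySem.List.sorted_pairwise list _
  have hsne : PySem.List.sorted list (fun x => x) false ≠ [] := by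
    rw [Ne, PySem.List.sorted_eq_nil_iff]; exact hpre
  obtain ⟨⟨w, hw, hwbest⟩, hub⟩ := sweep_spec _ hspw hsne
  -- the dict's values list is nonempty, so A's max? is some m
  cases hmax : PySem.List.max? ((PySem.Set.ofList list).map (fun k => ((list.count k : Nat) : Int))) (fun v => v) with
  | none =>
    exfalso
    rw [PySem.List.max?_eq_none_iff, List.map_eq_nil_iff] at hmax
    cases list with
    | nil => exact hpre rfl
    | cons z t' =>
      have hz : z ∈ PySem.Set.ofList (z :: t') := by
        rw [PySem.Set.mem_ofList]; exact List.mem_cons_self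
      rw [hmax] at hz
      exact List.not_mem_nil hz
  | some m =>
    -- m is the count of some element, and dominates all counts
    obtain ⟨k, hk, hkm⟩ := List.mem_map.mp (PySem.List.max?_mem hmax)
    have hkl : k ∈ list := (PySem.Set.mem_ofList list k).mp hk
    -- m = best, by antisymmetry
    have hle1 : m ≤ (List.foldl pvStep (none, 0, 0) (PySem.List.sorted list (fun x => x) false)).2.2 := by
      have hks : k ∈ PySem.List.sorted list (fun x => x) false := hsp.mem_iff.mpr hkl
      have h' := hub k hks
      rw [hsp.count_eq, hkm] at h'
      exact h'
    have hle2 : (List.foldl pvStep (none, 0, 0) (PySem.List.sorted list (fun x => x) false)).2.2 ≤ m := by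
      have hwl : w ∈ list := hsp.mem_iff.mp hw
      have hmem : ((list.count w : Nat) : Int)
          ∈ (PySem.Set.ofList list).map (fun k => ((list.count k : Nat) : Int)) :=
        List.mem_map.mpr ⟨w, (PySem.Set.mem_ofList list w).mpr hwl, rfl⟩
      have := PySem.List.max?_isMax hmax _ hmem
      rw [hwbest, hsp.count_eq]
      exact this
    have : m = (List.foldl pvStep (none, 0, 0) (PySem.List.sorted list (fun x => x) false)).2.2 :=
      le_antisymm hle1 hle2
    rw [this]
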